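-- pv_equiv track=rewrite | github.com/JaBorst/mlmc | helpers/embeddings/labels.py | to_scheme
-- ===== SOURCE A (Python) =====
-- def to_scheme(tagset, scheme="iobes", outside="O"):
--     scheme = scheme.lower()
--     if scheme == "iobes" or scheme == "bioes":
--         return ([outside] + ["I-" + x for x in tagset] + ["B-" + x for x in tagset] + ["E-" + x for x in tagset] + [
--             "S-" + x for x in tagset])
--     elif (scheme == "bilou"):
--         return (
--                 [outside] + ["B-" + x for x in tagset] + ["I-" + x for x in tagset] + ["L-" + x for x in tagset] + [
--             "U-" + x for x in tagset])
--     elif (scheme == "bio" or scheme == "iob"):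
--         return ([outside] + ["B-" + x for x in tagset] + ["I-" + x for x in tagset])
--     elif (scheme == "noprefix"):
--         return [outside] + tagset
-- ===== SOURCE B (Python) =====
-- # Flat product-index loop: one counter i over len(prefixes)*len(tagset) with divmod picking
-- # the prefix and the tag, instead of staged per-prefix comprehensions.
-- _SCHEMES = {"iobes": "IBES", "bioes": "IBES", "bilou": "BILU", "bio": "BI", "iob": "BI"}
--
-- def to_scheme(tagset, scheme="iobes", outside="O"):
--     scheme = scheme.lower()
--     if scheme == "noprefix":
--         return [outside] + list(tagset)
--     prefixes = _SCHEMES.get(scheme)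
--     if prefixes is None:
--         return None
--     n = len(tagset)
--     out = [outside]
--     for i in range(len(prefixes) * n):
--         p, t = divmod(i, n)
--         out.append(prefixes[p] + "-" + tagset[t])
--     return out
-- ===== Notes on version B (the rewrite author's own statement) =====
-- stated objective: alternative
-- what changed: Replaced the if/elif chain of staged per-prefix list comprehensions with a scheme->prefix-string table and a single flat loop over one product index i in range(len(prefixes)*len(tagset)), recovering the prefix and tag by divmod(i, n), appending into one accumulator list.
import Mathlib
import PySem

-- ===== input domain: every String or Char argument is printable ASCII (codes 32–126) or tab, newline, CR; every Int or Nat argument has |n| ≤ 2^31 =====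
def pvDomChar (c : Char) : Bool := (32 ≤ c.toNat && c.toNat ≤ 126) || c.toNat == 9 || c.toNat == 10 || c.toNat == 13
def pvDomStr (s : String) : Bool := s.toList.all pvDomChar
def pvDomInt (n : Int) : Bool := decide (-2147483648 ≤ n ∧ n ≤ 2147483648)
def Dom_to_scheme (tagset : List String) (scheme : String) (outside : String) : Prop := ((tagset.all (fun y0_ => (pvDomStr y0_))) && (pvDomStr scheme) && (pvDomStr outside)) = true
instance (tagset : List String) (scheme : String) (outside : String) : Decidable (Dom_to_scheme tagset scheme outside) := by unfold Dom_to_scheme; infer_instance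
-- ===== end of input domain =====

-- B replaces A's if/elif chain of staged per-prefix comprehensions by a scheme->prefix-string
-- table and ONE flat loop over a product index i < len(prefixes)*len(tagset), recovering the
-- prefix and the tag by divmod(i, n); objective = alternative (no speed claim).

-- ===== PORT A =====
def to_scheme (tagset : List String) (scheme : String) (outside : String) : Option (List String) :=
  let scheme := PySem.Str.lower scheme
  if scheme == "iobes" || scheme == "bioes" then
    some ([outside] ++ tagset.map (fun x => "I-" ++ x) ++ tagset.map (fun x => "B-" ++ x)
          ++ tagset.map (fun x => "E-" ++ x) ++ tagset.map (fun x => "S-" ++ x))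
  else if scheme == "bilou" then
    some ([outside] ++ tagset.map (fun x => "B-" ++ x) ++ tagset.map (fun x => "I-" ++ x)
          ++ tagset.map (fun x => "L-" ++ x) ++ tagset.map (fun x => "U-" ++ x))
  else if scheme == "bio" || scheme == "iob" then
    some ([outside] ++ tagset.map (fun x => "B-" ++ x) ++ tagset.map (fun x => "I-" ++ x))
  else if scheme == "noprefix" then
    some ([outside] ++ tagset)
  else
    none

-- ===== PORT B =====
def pvSchemes : PySem.Dict String String :=
  PySem.Dict.ofList [("iobes", "IBES"), ("bioes", "IBES"), ("bilou", "BILU"), ("bio", "BI"), ("iob", "BI")]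

-- The loop indexes prefixes[p] and tagset[t] with p = i // n < len(prefixes), t = i % n < n,
-- always in range, so pyGetD with an arbitrary default is exact; divmod(i, n) runs only when
-- n > 0 (range(len(prefixes)*n) is empty otherwise), so floordiv/mod is exact there.
def to_scheme_alt (tagset : List String) (scheme : String) (outside : String) : Option (List String) :=
  let scheme := PySem.Str.lower scheme
  if scheme == "noprefix" then
    some ([outside] ++ tagset)
  else
    match PySem.Dict.get? pvSchemes scheme with
    | none => none
    | some prefixes =>
        let n : Int := tagset.length
        some ((PySem.List.pyRange 0 ((prefixes.toList.length : Int) * n) 1).foldl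
          (fun out i =>
            out ++ [String.ofList [PySem.List.pyGetD prefixes.toList (PySem.Int.floordiv i n) 'A']
                    ++ "-" ++ PySem.List.pyGetD tagset (PySem.Int.mod i n) ""])
          [outside])

-- ===== PRECONDITION & SPEC =====
def Spec_to_scheme (tagset : List String) (scheme : String) (outside : String) (out : Option (List String)) : Prop := out = to_scheme_alt tagset scheme outside
instance (tagset : List String) (scheme : String) (outside : String) (out : Option (List String)) : Decidable (Spec_to_scheme tagset scheme outside out) := by unfold Spec_to_scheme; infer_instance

-- ===== CLAIM (what is proved, stated in full; the proofs are below) =====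
def Claim_equal_to_scheme : Prop := ∀ (tagset : List String) (scheme : String) (outside : String), Dom_to_scheme tagset scheme outside → Spec_to_scheme tagset scheme outside (to_scheme tagset scheme outside)

-- ===== LEMMAS AND PROOFS =====
theorem pv_map_range_getD {α : Type} (l : List α) (d : α) :
    (List.range l.length).map (fun j => l.getD j d) = l := by
  apply List.ext_getElem
  · simp
  · intro i h1 h2
    simp [List.getD_eq_getElem?_getD, List.getElem?_eq_getElem h2]

-- one chunk of the product-index loop, i ∈ [k*n, (k+1)*n), covers prefix number k
theorem pv_chunk (tagset : List String) (h : Int → String → String) (k : Nat) (init : List String) :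
    (PySem.List.pyRange ((k : Int) * tagset.length) (((k : Int) + 1) * tagset.length) 1).foldl
      (fun out i => out ++ [h (PySem.Int.floordiv i (tagset.length : Int))
                              (PySem.List.pyGetD tagset (PySem.Int.mod i (tagset.length : Int)) "")]) init
    = init ++ tagset.map (fun x => h (k : Int) x) := by
  rw [PySem.List.pyRange_one]
  have hb : (((k : Int) + 1) * tagset.length - (k : Int) * tagset.length).toNat = tagset.length := by
    have : ((k : Int) + 1) * tagset.length - (k : Int) * tagset.length = tagset.length := by ring
    rw [this]; exact Int.toNat_natCast _
  rw [hb, List.foldl_map, PySem.List.foldl_append_singleton_eq_map]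
  congr 1
  conv_rhs => rw [← pv_map_range_getD tagset ""]
  rw [List.map_map]
  apply List.map_congr_left
  intro j hj
  rw [List.mem_range] at hj
  have hcast : (k : Int) * tagset.length + (j : Int) = ((k * tagset.length + j : Nat) : Int) := by push_cast; ring
  rw [hcast, PySem.Int.floordiv_natCast, PySem.Int.mod_natCast, PySem.List.pyGetD_natCast]
  have hdiv : (k * tagset.length + j) / tagset.length = k := by
    rw [Nat.mul_comm, Nat.mul_add_div (by omega), Nat.div_eq_of_lt hj, Nat.add_zero]
  have hmod : (k * tagset.length + j) % tagset.length = j := by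
    rw [Nat.mul_comm, Nat.mul_add_mod, Nat.mod_eq_of_lt hj]
  simp [hdiv, hmod, Function.comp]

-- the whole loop, from prefix k on, equals the staged flatMap over the remaining prefixes
theorem pv_loop (tagset : List String) (full : List Char) :
    ∀ (m k : Nat) (init : List String), m + k = full.length →
    (PySem.List.pyRange ((k : Int) * tagset.length) ((full.length : Int) * tagset.length) 1).foldl
      (fun out i =>
        out ++ [String.ofList [PySem.List.pyGetD full (PySem.Int.floordiv i (tagset.length : Int)) 'A']
                ++ "-" ++ PySem.List.pyGetD tagset (PySem.Int.mod i (tagset.length : Int)) ""]) init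
    = init ++ (full.drop k).flatMap (fun p => tagset.map (fun x => String.ofList [p] ++ "-" ++ x)) := by
  intro m
  induction m with
  | zero =>
      intro k init hk
      have hkl : k = full.length := by omega
      subst hkl
      rw [PySem.List.pyRange_one_eq_nil (by omega), List.drop_length]
      simp
  | succ m ih =>
      intro k init hk
      have hklt : k < full.length := by omega
      have hsplit : PySem.List.pyRange ((k : Int) * tagset.length) ((full.length : Int) * tagset.length) 1
          = PySem.List.pyRange ((k : Int) * tagset.length) (((k : Int) + 1) * tagset.length) 1
            ++ PySem.List.pyRange (((k : Int) + 1) * tagset.length) ((full.length : Int) * tagset.length) 1 := by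
        refine PySem.List.pyRange_one_append _ _ _ ?_ ?_
        · exact mul_le_mul_of_nonneg_right (by omega) (by positivity)
        · exact mul_le_mul_of_nonneg_right (by exact_mod_cast hklt) (by positivity)
      rw [hsplit, List.foldl_append]
      rw [pv_chunk tagset (fun i x => String.ofList [PySem.List.pyGetD full i 'A'] ++ "-" ++ x) k init]
      have hcast : ((k : Int) + 1) = ((k + 1 : Nat) : Int) := by push_cast; ring
      rw [hcast, ih (k + 1) _ (by omega)]
      rw [List.drop_eq_getElem_cons hklt, List.flatMap_cons]
      have : PySem.List.pyGetD full ((k : Nat) : Int) 'A' = full[k] := by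
        rw [PySem.List.pyGetD_natCast, List.getD_eq_getElem?_getD, List.getElem?_eq_getElem hklt]
        rfl
      simp [this, List.append_assoc]

theorem pv_loop0 (tagset : List String) (full : List Char) (init : List String) :
    (PySem.List.pyRange 0 ((full.length : Int) * tagset.length) 1).foldl
      (fun out i =>
        out ++ [String.ofList [PySem.List.pyGetD full (PySem.Int.floordiv i (tagset.length : Int)) 'A']
                ++ "-" ++ PySem.List.pyGetD tagset (PySem.Int.mod i (tagset.length : Int)) ""]) init
    = init ++ full.flatMap (fun p => tagset.map (fun x => String.ofList [p] ++ "-" ++ x)) := by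
  have h := pv_loop tagset full full.length 0 init (by omega)
  simpa using h

theorem pvSchemes_items : pvSchemes.items = [("iobes", "IBES"), ("bioes", "IBES"), ("bilou", "BILU"), ("bio", "BI"), ("iob", "BI")] := by decide

-- ===== VERDICT (by name: the statement is the Claim_ definition above) =====
theorem to_scheme_spec : Claim_equal_to_scheme := by
  intro tagset scheme outside _
  unfold Spec_to_scheme to_scheme to_scheme_alt
  by_cases h1 : PySem.Str.lower scheme = "iobes"
  · rw [h1]
    have hg : PySem.Dict.get? pvSchemes "iobes" = some "IBES" := by decide
    simp [hg, -List.foldl_append_eq_append]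
    have h := pv_loop0 tagset ['I','B','E','S'] [outside]
    simp [-List.foldl_append_eq_append] at h
    rw [h]
  by_cases h2 : PySem.Str.lower scheme = "bioes"
  · rw [h2]
    have hg : PySem.Dict.get? pvSchemes "bioes" = some "IBES" := by decide
    simp [hg, -List.foldl_append_eq_append]
    have h := pv_loop0 tagset ['I','B','E','S'] [outside]
    simp [-List.foldl_append_eq_append] at h
    rw [h]
  by_cases h3 : PySem.Str.lower scheme = "bilou"
  · rw [h3]
    have hg : PySem.Dict.get? pvSchemes "bilou" = some "BILU" := by decide
    simp [hg, -List.foldl_append_eq_append]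
    have h := pv_loop0 tagset ['B','I','L','U'] [outside]
    simp [-List.foldl_append_eq_append] at h
    rw [h]
  by_cases h4 : PySem.Str.lower scheme = "bio"
  · rw [h4]
    have hg : PySem.Dict.get? pvSchemes "bio" = some "BI" := by decide
    simp [hg, -List.foldl_append_eq_append]
    have h := pv_loop0 tagset ['B','I'] [outside]
    simp [-List.foldl_append_eq_append] at h
    rw [h]
  by_cases h5 : PySem.Str.lower scheme = "iob"
  · rw [h5]
    have hg : PySem.Dict.get? pvSchemes "iob" = some "BI" := by decide
    simp [hg, -List.foldl_append_eq_append]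
    have h := pv_loop0 tagset ['B','I'] [outside]
    simp [-List.foldl_append_eq_append] at h
    rw [h]
  by_cases h6 : PySem.Str.lower scheme = "noprefix"
  · rw [h6]
    simp
  · -- unrecognised scheme: both sides are none
    have e1 : ("iobes" == PySem.Str.lower scheme) = false := beq_eq_false_iff_ne.mpr (Ne.symm h1)
    have e2 : ("bioes" == PySem.Str.lower scheme) = false := beq_eq_false_iff_ne.mpr (Ne.symm h2)
    have e3 : ("bilou" == PySem.Str.lower scheme) = false := beq_eq_false_iff_ne.mpr (Ne.symm h3)
    have e4 : ("bio" == PySem.Str.lower scheme) = false := beq_eq_false_iff_ne.mpr (Ne.symm h4)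
    have e5 : ("iob" == PySem.Str.lower scheme) = false := beq_eq_false_iff_ne.mpr (Ne.symm h5)
    simp [PySem.Dict.get?, pvSchemes_items, List.find?, e1, e2, e3, e4, e5, h1, h2, h3, h4, h5, h6]
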